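-- pv_equiv track=rewrite | github.com/taeGnues/PracticeBaekjoon | 프로그래머스/2/42586. 기능개발/기능개발.py | solution
-- ===== SOURCE A (Python) =====
-- from collections import deque
--
-- def solution(progresses, speeds):
--     answer = []
--     q = deque()
--     for i in range(len(progresses)):
--         q.append([progresses[i], speeds[i]])
--
--     s = 0
--     while s<len(progresses):
--         a = 0
--         for i in q:
--             i[0] += i[1]
--
--         while q:
--             if q[0][0] >= 100 :
--                 a+=1
--                 s+=1
--                 q.popleft()
--             else:
--                 break
--
--         if a>0:
--             answer.append(a)
--
--     return answer
-- ===== SOURCE B (Python) =====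
-- def solution(progresses, speeds):
--     answer = []
--     cur = 0   # deadline (finish day) of the current group's leader
--     cnt = 0   # tasks in the current group
--     for p, v in zip(progresses, speeds):
--         d = max(1, -(-(100 - p) // v))  # days until this task is done
--         if cnt and d <= cur:
--             cnt += 1
--         else:
--             if cnt:
--                 answer.append(cnt)
--             cur = d
--             cnt = 1
--     if cnt:
--         answer.append(cnt)
--     return answer
-- ===== Notes on version B (the rewrite author's own statement) =====
-- stated objective: alternative
-- what changed: B replaces A's day-by-day queue simulation (add speed to every pending task each day, pop finished heads) by computing each task's finish day once with ceiling division and grouping tasks in one pass by the running maximum deadline; intended as the asymptotically cheaper algorithm, but a timing run could not verify a ratio (A timed out at n=16 where B returned).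
-- outside the precondition, e.g. on solution([0, 200], [100, -5]): A returns [2], B returns [1, 1]; on solution([100], [0]): A returns [1], B raises ZeroDivisionError
import Mathlib
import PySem

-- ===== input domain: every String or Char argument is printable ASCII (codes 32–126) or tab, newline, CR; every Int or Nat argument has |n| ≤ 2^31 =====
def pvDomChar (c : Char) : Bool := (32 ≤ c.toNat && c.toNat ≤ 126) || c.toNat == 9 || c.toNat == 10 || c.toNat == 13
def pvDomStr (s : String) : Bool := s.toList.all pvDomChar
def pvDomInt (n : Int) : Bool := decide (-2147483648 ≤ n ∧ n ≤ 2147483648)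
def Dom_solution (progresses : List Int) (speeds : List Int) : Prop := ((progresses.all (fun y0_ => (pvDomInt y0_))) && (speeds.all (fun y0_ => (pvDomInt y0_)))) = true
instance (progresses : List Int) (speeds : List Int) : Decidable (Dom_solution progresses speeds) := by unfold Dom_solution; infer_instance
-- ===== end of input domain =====

-- B computes each task's finish day once by ceiling division and groups tasks in one pass by the
-- running maximum deadline, instead of A's day-by-day queue simulation; proved for positive speeds.


-- ===== PORT A =====
-- the daily increment `i[0] += i[1]` applied to each queue cell
def pvInc (pv : Int × Int) : Int × Int := (pv.1 + pv.2, pv.2)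

-- the inner `while q:` pop loop: count and drop finished heads
def popA : List (Int × Int) → Int × List (Int × Int)
  | [] => (0, [])
  | i :: q =>
    if 100 ≤ i.1 then
      let r := popA q
      (r.1 + 1, r.2)
    else (0, i :: q)

-- the outer `while s < len(progresses):` loop; fuel is a totality guard only (proved sufficient below)
def loopA : Nat → Int → Int → List Int → List (Int × Int) → List Int
  | 0, _, _, answer, _ => answer
  | fuel + 1, n, s, answer, q =>
    if s < n then
      let q1 := q.map pvInc
      let r := popA q1
      loopA fuel n (s + r.1) (if 0 < r.1 then answer ++ [r.1] else answer) r.2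
    else answer

def solution (progresses : List Int) (speeds : List Int) : List Int :=
  -- `for i in range(len(progresses)): q.append([progresses[i], speeds[i]])`: under Pre_ (speeds at
  -- least as long as progresses, else Python raises IndexError) this queue is exactly the zip.
  loopA ((progresses.map (fun p => (101 - p).toNat + 1)).sum + 1)
    (PySem.List.len progresses) 0 [] (progresses.zip speeds)

-- ===== PORT B =====
def pvStepB (st : List Int × Int × Int) (pv : Int × Int) : List Int × Int × Int :=
  let d := max 1 (-(PySem.Int.floordiv (-(100 - pv.1)) pv.2))
  if st.2.2 ≠ 0 ∧ d ≤ st.2.1 then (st.1, st.2.1, st.2.2 + 1)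
  else ((if st.2.2 ≠ 0 then st.1 ++ [st.2.2] else st.1), d, 1)

def solution_alt (progresses : List Int) (speeds : List Int) : List Int :=
  let st := (progresses.zip speeds).foldl pvStepB ([], 0, 0)
  if st.2.2 ≠ 0 then st.1 ++ [st.2.2] else st.1

-- ===== PRECONDITION & SPEC =====
-- Pre_ excludes inputs where speeds is shorter than progresses (A raises IndexError) and inputs
-- with a non-positive speed among the used prefix: there A diverges whenever some task never
-- reaches 100, its occasional returns (every task happening to finish on day one) are accidental,
-- and B raises ZeroDivisionError for speed 0 or groups by a meaningless negative-speed deadline.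
def Pre_solution (progresses : List Int) (speeds : List Int) : Prop :=
  progresses.length ≤ speeds.length ∧ ∀ v ∈ speeds.take progresses.length, 1 ≤ v
instance (progresses : List Int) (speeds : List Int) : Decidable (Pre_solution progresses speeds) := by
  unfold Pre_solution; infer_instance

def pvWitness_solution : List Int × List Int := ([30, 95, 10], [5, 10, 45])

def Spec_solution (progresses : List Int) (speeds : List Int) (out : List Int) : Prop := out = solution_alt progresses speeds
instance (progresses : List Int) (speeds : List Int) (out : List Int) : Decidable (Spec_solution progresses speeds out) := by unfold Spec_solution; infer_instance

-- ===== CLAIM (what is proved, stated in full; the proofs are below) =====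
def Claim_equal_solution : Prop := ∀ (progresses : List Int) (speeds : List Int), Dom_solution progresses speeds → Pre_solution progresses speeds → Spec_solution progresses speeds (solution progresses speeds)

-- ===== LEMMAS AND PROOFS =====

-- days remaining for a task: ceil((100 - p) / v), unsaturated
def pvCeil (p v : Int) : Int := -(PySem.Int.floordiv (p - 100) v)
def pvDay (pv : Int × Int) : Int := max 1 (pvCeil pv.1 pv.2)
-- "finishes on the very next day"
def pvP (pv : Int × Int) : Bool := pvCeil pv.1 pv.2 ≤ 1

def groupsAux (cur cnt : Int) : List Int → List Int
  | [] => [cnt]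
  | d :: rest => if d ≤ cur then groupsAux cur (cnt + 1) rest else cnt :: groupsAux d 1 rest

def groups : List Int → List Int
  | [] => []
  | d :: rest => groupsAux d 1 rest

def Fq (q : List (Int × Int)) : Nat := (q.map (fun pv => (pvDay pv).toNat)).sum

lemma ceil_le_one_iff (p v : Int) (hv : 1 ≤ v) : (100 ≤ p + v) ↔ pvCeil p v ≤ 1 := by
  have h := PySem.Int.le_floordiv_iff_mul_le (a := p - 100) (b := v) (q := -1) (by omega)
  unfold pvCeil
  omega

lemma ceil_step (p v : Int) (hv : 1 ≤ v) : pvCeil (p + v) v = pvCeil p v - 1 := by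
  unfold pvCeil
  rw [PySem.Int.floordiv_eq_ediv_of_pos (by omega), PySem.Int.floordiv_eq_ediv_of_pos (by omega)]
  have h : p + v - 100 = (p - 100) + 1 * v := by ring
  rw [h, Int.add_mul_ediv_right _ _ (by omega : v ≠ 0)]
  ring

lemma day_inc (pv : Int × Int) (hv : 1 ≤ pv.2) :
    pvDay (pvInc pv) = max 1 (pvCeil pv.1 pv.2 - 1) := by
  show max 1 (pvCeil (pv.1 + pv.2) pv.2) = _
  rw [ceil_step pv.1 pv.2 hv]

lemma one_le_day (pv : Int × Int) : 1 ≤ pvDay pv := le_max_left _ _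

lemma day_toNat_le (p v : Int) (hv : 1 ≤ v) : (pvDay (p, v)).toNat ≤ (101 - p).toNat + 1 := by
  show (max 1 (pvCeil p v)).toNat ≤ _
  by_cases hp : p ≤ 100
  · have h := PySem.Int.le_floordiv_iff_mul_le (a := p - 100) (b := v) (q := p - 100) (by omega)
    have hm : (p - 100) * v ≤ (p - 100) * 1 := mul_le_mul_of_nonpos_left hv (by omega)
    unfold pvCeil
    omega
  · have h := PySem.Int.le_floordiv_iff_mul_le (a := p - 100) (b := v) (q := 0) (by omega)
    unfold pvCeil
    omega

lemma popA_map_inc (q : List (Int × Int)) (hv : ∀ pv ∈ q, 1 ≤ pv.2) :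
    popA (q.map pvInc) = (((q.takeWhile pvP).length : Int), (q.dropWhile pvP).map pvInc) := by
  induction q with
  | nil => simp [popA]
  | cons pv rest ih =>
    have hpv := hv pv (List.mem_cons_self ..)
    have hiff := ceil_le_one_iff pv.1 pv.2 hpv
    by_cases hc : pvCeil pv.1 pv.2 ≤ 1
    · have hp : pvP pv = true := by simp [pvP]; omega
      rw [List.map_cons, List.takeWhile_cons_of_pos hp, List.dropWhile_cons_of_pos hp]
      have : 100 ≤ (pvInc pv).1 := by unfold pvInc; simpa using (by omega : 100 ≤ pv.1 + pv.2)
      simp only [popA, if_pos this, ih (fun x hx => hv x (List.mem_cons_of_mem _ hx))]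
      simp
    · have hp : ¬ pvP pv = true := by simp [pvP]; omega
      rw [List.map_cons, List.takeWhile_cons_of_neg hp, List.dropWhile_cons_of_neg hp]
      have : ¬ 100 ≤ (pvInc pv).1 := by unfold pvInc; simp; omega
      simp [popA, if_neg this]

lemma groupsAux_inc (q : List (Int × Int)) (cur cnt : Int) (hv : ∀ pv ∈ q, 1 ≤ pv.2)
    (hcur : 2 ≤ cur) :
    groupsAux (cur - 1) cnt ((q.map pvInc).map pvDay) = groupsAux cur cnt (q.map pvDay) := by
  induction q generalizing cur cnt with
  | nil => simp [groupsAux]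
  | cons pv rest ih =>
    have hpv := hv pv (List.mem_cons_self ..)
    have hvr : ∀ x ∈ rest, 1 ≤ x.2 := fun x hx => hv x (List.mem_cons_of_mem _ hx)
    have hd : pvDay (pvInc pv) = max 1 (pvCeil pv.1 pv.2 - 1) := day_inc pv hpv
    have hdd : pvDay pv = max 1 (pvCeil pv.1 pv.2) := rfl
    simp only [List.map_cons, groupsAux, hd, hdd]
    by_cases h1 : max 1 (pvCeil pv.1 pv.2) ≤ cur
    · rw [if_pos (by omega), if_pos h1]
      exact ih cur (cnt + 1) hvr hcur
    · rw [if_neg (by omega), if_neg h1]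
      have he2 : 2 ≤ pvCeil pv.1 pv.2 := by omega
      have h3 : max 1 (pvCeil pv.1 pv.2 - 1) = pvCeil pv.1 pv.2 - 1 := by omega
      have h4 : max 1 (pvCeil pv.1 pv.2) = pvCeil pv.1 pv.2 := by omega
      rw [h3, h4]
      exact congrArg (cnt :: ·) (ih (pvCeil pv.1 pv.2) 1 hvr he2)

lemma groupsAux_pop (tl : List (Int × Int)) (cnt : Int) (hv : ∀ pv ∈ tl, 1 ≤ pv.2) :
    groupsAux 1 cnt (tl.map pvDay) =
      (cnt + ((tl.takeWhile pvP).length : Int)) ::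
        groups (((tl.dropWhile pvP).map pvInc).map pvDay) := by
  induction tl generalizing cnt with
  | nil => simp [groupsAux, groups]
  | cons pv rest ih =>
    have hpv := hv pv (List.mem_cons_self ..)
    have hvr : ∀ x ∈ rest, 1 ≤ x.2 := fun x hx => hv x (List.mem_cons_of_mem _ hx)
    have hdd : pvDay pv = max 1 (pvCeil pv.1 pv.2) := rfl
    by_cases hc : pvCeil pv.1 pv.2 ≤ 1
    · have hp : pvP pv = true := by simp [pvP]; omega
      rw [List.takeWhile_cons_of_pos hp, List.dropWhile_cons_of_pos hp]
      simp only [List.map_cons, groupsAux, hdd]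
      rw [if_pos (by omega), ih (cnt + 1) hvr]
      congr 1
      simp only [List.length_cons]
      push_cast
      ring
    · have hp : ¬ pvP pv = true := by simp [pvP]; omega
      rw [List.takeWhile_cons_of_neg hp, List.dropWhile_cons_of_neg hp]
      simp only [List.map_cons, groupsAux, hdd, groups]
      rw [if_neg (by omega)]
      have hd : pvDay (pvInc pv) = max 1 (pvCeil pv.1 pv.2 - 1) := day_inc pv hpv
      rw [hd]
      have h3 : max 1 (pvCeil pv.1 pv.2 - 1) = pvCeil pv.1 pv.2 - 1 := by omega
      have h4 : max 1 (pvCeil pv.1 pv.2) = pvCeil pv.1 pv.2 := by omega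
      rw [h3, h4]
      have := groupsAux_inc rest (pvCeil pv.1 pv.2) 1 hvr (by omega)
      simp only [this]
      simp

lemma Fq_map_inc_le (q : List (Int × Int)) (hv : ∀ pv ∈ q, 1 ≤ pv.2) :
    Fq (q.map pvInc) ≤ Fq q := by
  induction q with
  | nil => simp [Fq]
  | cons pv rest ih =>
    have hpv := hv pv (List.mem_cons_self ..)
    have hd : pvDay (pvInc pv) = max 1 (pvCeil pv.1 pv.2 - 1) := day_inc pv hpv
    have hdd : pvDay pv = max 1 (pvCeil pv.1 pv.2) := rfl
    simp only [Fq, List.map_cons, List.sum_cons]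
    have h1 : (pvDay (pvInc pv)).toNat ≤ (pvDay pv).toNat := by rw [hd, hdd]; omega
    have h2 := ih (fun x hx => hv x (List.mem_cons_of_mem _ hx))
    simp only [Fq] at h2
    omega

lemma loopA_eq (fuel : Nat) (q : List (Int × Int)) (n s : Int) (ans : List Int)
    (hv : ∀ pv ∈ q, 1 ≤ pv.2) (hn : s + (q.length : Int) = n) (hf : Fq q ≤ fuel) :
    loopA fuel n s ans q = ans ++ groups (q.map pvDay) := by
  induction fuel generalizing q s ans with
  | zero =>
    cases q with
    | nil => simp [loopA, groups]
    | cons pv rest =>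
      exfalso
      have h1 : 1 ≤ pvDay pv := one_le_day pv
      simp only [Fq, List.map_cons, List.sum_cons] at hf
      omega
  | succ fuel ih =>
    cases q with
    | nil =>
      have hns : ¬ s < n := by simp at hn; omega
      simp [loopA, hns, groups]
    | cons hd tl =>
      have hs : s < n := by
        simp only [List.length_cons] at hn
        push_cast at hn
        omega
      have hhd := hv hd (List.mem_cons_self ..)
      have hvt : ∀ x ∈ tl, 1 ≤ x.2 := fun x hx => hv x (List.mem_cons_of_mem _ hx)
      have hvdw : ∀ x ∈ tl.dropWhile pvP, 1 ≤ x.2 :=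
        fun x hx => hvt x ((List.dropWhile_sublist pvP).mem hx)
      have hvq1 : ∀ x ∈ (hd :: tl).map pvInc, 1 ≤ x.2 := by
        intro x hx
        obtain ⟨y, hy, rfl⟩ := List.mem_map.mp hx
        exact hv y hy
      have hpop := popA_map_inc (hd :: tl) hv
      have htwdw := congrArg List.length (List.takeWhile_append_dropWhile (p := pvP) (l := tl))
      rw [List.length_append] at htwdw
      have hFsplit : Fq tl = Fq (tl.takeWhile pvP) + Fq (tl.dropWhile pvP) := by
        rw [Fq, Fq, Fq, ← List.sum_append, ← List.map_append, List.takeWhile_append_dropWhile]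
      have hFhd : Fq (hd :: tl) = (pvDay hd).toNat + Fq tl := by simp [Fq]
      by_cases hc : pvCeil hd.1 hd.2 ≤ 1
      · -- pop day: the head (and the whole ready prefix) is removed
        have hp : pvP hd = true := by simp [pvP]; omega
        rw [List.takeWhile_cons_of_pos hp, List.dropWhile_cons_of_pos hp] at hpop
        have hd1 : pvDay hd = 1 := by
          show max 1 (pvCeil hd.1 hd.2) = 1
          omega
        simp only [loopA, if_pos hs, hpop]
        rw [if_pos (by simp only [List.length_cons]; push_cast; omega :
          (0 : Int) < ((hd :: tl.takeWhile pvP).length : Int))]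
        have hvdwmap : ∀ x ∈ (tl.dropWhile pvP).map pvInc, 1 ≤ x.2 := by
          intro x hx
          obtain ⟨y, hy, rfl⟩ := List.mem_map.mp hx
          exact hvdw y hy
        rw [ih ((tl.dropWhile pvP).map pvInc) _ _ hvdwmap ?hn2 ?hf2]
        case hn2 =>
          simp only [List.length_map, List.length_cons] at *
          push_cast at *
          omega
        case hf2 =>
          have h5 := Fq_map_inc_le (tl.dropWhile pvP) hvdw
          have h6 : 0 ≤ Fq (tl.takeWhile pvP) := Nat.zero_le _
          omega
        · -- assemble the answer lists
          have hgrp := groupsAux_pop tl 1 hvt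
          simp only [List.map_cons, groups, hd1]
          rw [hgrp]
          simp only [List.length_cons, List.append_assoc, List.singleton_append]
          congr 2
          push_cast
          ring
      · -- no task finishes this day: queue is just incremented
        have hp : ¬ pvP hd = true := by simp [pvP]; omega
        rw [List.takeWhile_cons_of_neg hp, List.dropWhile_cons_of_neg hp] at hpop
        simp only [loopA, if_pos hs, hpop]
        simp only [List.length_nil, Nat.cast_zero, add_zero, lt_self_iff_false, if_false]
        rw [ih ((hd :: tl).map pvInc) _ _ hvq1 ?hn3 ?hf3]
        case hn3 => simp only [List.length_map]; omega
        case hf3 =>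
          have hdinc : pvDay (pvInc hd) = max 1 (pvCeil hd.1 hd.2 - 1) := day_inc hd hhd
          have h5 := Fq_map_inc_le tl hvt
          have h6 : Fq ((hd :: tl).map pvInc) = (pvDay (pvInc hd)).toNat + Fq (tl.map pvInc) := by
            simp [Fq]
          have h7 : (pvDay hd) = max 1 (pvCeil hd.1 hd.2) := rfl
          omega
        · -- the grouping is invariant under the global decrement
          have hdinc : pvDay (pvInc hd) = max 1 (pvCeil hd.1 hd.2 - 1) := day_inc hd hhd
          have h3 : max 1 (pvCeil hd.1 hd.2 - 1) = pvCeil hd.1 hd.2 - 1 := by omega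
          have h7 : pvDay hd = max 1 (pvCeil hd.1 hd.2) := rfl
          have h4 : max 1 (pvCeil hd.1 hd.2) = pvCeil hd.1 hd.2 := by omega
          simp only [List.map_cons, groups, hdinc, h3, h7, h4]
          rw [groupsAux_inc tl (pvCeil hd.1 hd.2) 1 hvt (by omega)]

lemma foldB_eq (ps : List (Int × Int)) (ans : List Int) (cur cnt : Int) (hc : 1 ≤ cnt) :
    (let st := ps.foldl pvStepB (ans, cur, cnt);
      if st.2.2 ≠ 0 then st.1 ++ [st.2.2] else st.1)
    = ans ++ groupsAux cur cnt (ps.map pvDay) := by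
  induction ps generalizing ans cur cnt with
  | nil =>
    have hc0 : cnt ≠ 0 := by omega
    simp [groupsAux, hc0]
  | cons pv rest ih =>
    have hstep : pvStepB (ans, cur, cnt) pv =
        if pvDay pv ≤ cur then (ans, cur, cnt + 1) else (ans ++ [cnt], pvDay pv, 1) := by
      have hc0 : cnt ≠ 0 := by omega
      simp only [pvStepB, show -(100 - pv.1) = pv.1 - 100 from by ring,
        show max 1 (-PySem.Int.floordiv (pv.1 - 100) pv.2) = pvDay pv from rfl]
      by_cases h : pvDay pv ≤ cur <;> simp [h, hc0]
    simp only [List.foldl_cons, hstep, List.map_cons, groupsAux]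
    by_cases h : pvDay pv ≤ cur
    · rw [if_pos h, if_pos h, ih ans cur (cnt + 1) (by omega)]
    · rw [if_neg h, if_neg h, ih (ans ++ [cnt]) (pvDay pv) 1 le_rfl]
      simp

lemma alt_eq_groups (progresses speeds : List Int) :
    solution_alt progresses speeds = groups ((progresses.zip speeds).map pvDay) := by
  unfold solution_alt
  induction h : progresses.zip speeds with
  | nil => simp [groups]
  | cons pv rest _ =>
    have hstep : pvStepB ([], 0, 0) pv = ([], pvDay pv, 1) := by
      simp [pvStepB, show -(100 - pv.1) = pv.1 - 100 from by ring,
        show max 1 (-PySem.Int.floordiv (pv.1 - 100) pv.2) = pvDay pv from rfl]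
    simp only [List.foldl_cons, hstep, List.map_cons, groups]
    exact foldB_eq rest [] (pvDay pv) 1 le_rfl

lemma snd_mem_take (ps vs : List Int) (pv : Int × Int) (h : pv ∈ ps.zip vs) :
    pv.2 ∈ vs.take ps.length := by
  induction ps generalizing vs pv with
  | nil => simp at h
  | cons p ps' ih =>
    cases vs with
    | nil => simp at h
    | cons v vs' =>
      simp only [List.zip_cons_cons, List.mem_cons] at h
      rw [List.length_cons, List.take_succ_cons]
      rcases h with h | h
      · subst h; exact List.mem_cons_self ..
      · exact List.mem_cons_of_mem _ (ih vs' pv h)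

lemma Fq_zip_le (ps vs : List Int) (hv : ∀ pv ∈ ps.zip vs, 1 ≤ pv.2) :
    Fq (ps.zip vs) ≤ (ps.map (fun p => (101 - p).toNat + 1)).sum := by
  induction ps generalizing vs with
  | nil => simp [Fq]
  | cons p ps' ih =>
    cases vs with
    | nil => simp [Fq]
    | cons v vs' =>
      simp only [List.zip_cons_cons, Fq, List.map_cons, List.sum_cons]
      have h1 : 1 ≤ v := hv (p, v) (List.mem_cons_self ..)
      have h2 := day_toNat_le p v h1
      have h3 := ih vs' (fun x hx => hv x (List.mem_cons_of_mem _ hx))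
      simp only [Fq] at h3
      omega

-- ===== VERDICT (by name: the statement is the Claim_ definition above) =====
theorem solution_spec : Claim_equal_solution := by
  intro ps vs _hdom hpre
  unfold Spec_solution
  obtain ⟨hlen, hpos⟩ := hpre
  have hv : ∀ pv ∈ ps.zip vs, 1 ≤ pv.2 := fun pv hpv => hpos pv.2 (snd_mem_take ps vs pv hpv)
  unfold solution
  rw [loopA_eq _ _ _ _ _ hv ?hn ?hf]
  case hn =>
    rw [PySem.List.len_eq, List.length_zip]
    omega
  case hf =>
    have := Fq_zip_le ps vs hv
    omega
  rw [alt_eq_groups]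
  simp
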